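-- pv_equiv track=rewrite | github.com/dododoyo/Competitive-Programming | 0000CodeForces/C_Traffic_Light.py | getPassSec
-- ===== SOURCE A (Python) =====
-- def getPassSec(n,curr,arr):
--   if curr == "g":return 0;
--   paths = [0]*(2*countCurrentOccurrence(curr,arr))
--   arr = arr + arr;
--   j = 0
--   i = 0
--   while i < len(arr):
--     index_till_g = 0
--     if arr[i] == curr:
--       while i < len(arr) and arr[i] != "g" :
--         i += 1
--         index_till_g +=1
--       paths[j] = index_till_g;
--       j += 1
--     i += 1
--
--   return max(paths);
--
-- def countCurrentOccurrence(curr,arr):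
--   occur = 0;
--   for i in arr:
--     if i == curr:
--       occur += 1
--   return occur
-- ===== SOURCE B (Python) =====
-- def getPassSec(n, curr, arr):
--     # Backward suffix scan: one pass over arr+arr from the right keeping the
--     # running distance d to the next "g"; collect d at every curr position.
--     if curr == "g":
--         return 0
--     arr2 = arr + arr
--     paths = []
--     d = 0
--     for x in reversed(arr2):
--         d = 0 if x == "g" else d + 1
--         if x == curr:
--             paths.append(d)
--     return max(paths)
-- ===== Notes on version B (the rewrite author's own statement) =====
-- stated objective: alternative
-- what changed: Replaced A's forward scan (nested while that skips each run of curr up to the next 'g', writing into a preallocated array sized by a separate counting pass) with a single backward pass over arr+arr that maintains the running distance to the next 'g' and collects it at every curr position.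
import Mathlib
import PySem

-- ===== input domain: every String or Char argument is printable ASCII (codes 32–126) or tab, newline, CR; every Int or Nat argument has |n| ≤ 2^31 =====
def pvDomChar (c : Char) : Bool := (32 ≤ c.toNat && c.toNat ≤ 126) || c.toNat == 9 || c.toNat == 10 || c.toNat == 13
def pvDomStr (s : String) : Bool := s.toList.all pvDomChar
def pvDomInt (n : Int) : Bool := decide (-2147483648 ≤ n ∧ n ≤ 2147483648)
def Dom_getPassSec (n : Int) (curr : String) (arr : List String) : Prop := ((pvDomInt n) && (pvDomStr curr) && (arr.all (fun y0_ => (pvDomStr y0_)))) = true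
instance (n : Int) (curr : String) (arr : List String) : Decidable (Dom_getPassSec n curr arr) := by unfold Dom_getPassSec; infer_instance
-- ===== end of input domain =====

-- B replaces A's forward scan with nested run-skipping whiles by a single backward
-- suffix scan keeping the running distance to the next "g" (objective: alternative decomposition).

-- ===== PORT A =====
def countCurrentOccurrence (curr : String) (arr : List String) : Int :=
  arr.foldl (fun occur i => if i = curr then occur + 1 else occur) 0

-- inner `while i < len(arr) and arr[i] != "g"`: number of steps taken (= final index_till_g)
def innerA (L : List String) (i : Nat) : Nat :=
  if h : i < L.length then
    if L[i] = "g" then 0 else innerA L (i + 1) + 1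
  else 0
termination_by L.length - i

-- outer while loop of A: state (i, j, paths)
def loopA (curr : String) (L : List String) (i j : Nat) (paths : List Int) : List Int :=
  if h : i < L.length then
    if L[i] = curr then
      let k := innerA L i
      loopA curr L (i + k + 1) (j + 1) (paths.set j (Int.ofNat k))
    else
      loopA curr L (i + 1) j paths
  else paths
termination_by L.length - i

def getPassSec (n : Int) (curr : String) (arr : List String) : Int :=
  if curr = "g" then 0
  else
    let paths : List Int := List.replicate (2 * countCurrentOccurrence curr arr).toNat 0
    let arr2 := arr ++ arr
    -- max(paths): Python raises ValueError on an empty list; those inputs are outside Pre_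
    (PySem.List.max? (loopA curr arr2 0 0 paths) (fun x => x)).getD 0

-- ===== PORT B =====
def getPassSec_alt (n : Int) (curr : String) (arr : List String) : Int :=
  if curr = "g" then 0
  else
    let arr2 := arr ++ arr
    let st : Int × List Int :=
      arr2.reverse.foldl
        (fun (s : Int × List Int) x =>
          let d : Int := if x = "g" then 0 else s.1 + 1
          (d, if x = curr then s.2 ++ [d] else s.2))
        (0, [])
    -- max(paths): Python raises ValueError on an empty list; those inputs are outside Pre_
    (PySem.List.max? st.2 (fun x => x)).getD 0

-- ===== PRECONDITION & SPEC =====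
-- Pre_ excludes exactly the inputs where curr ≠ "g" and curr does not occur in arr:
-- there BOTH A and B call max([]) and raise ValueError (no value is returned).
def Pre_getPassSec (n : Int) (curr : String) (arr : List String) : Prop :=
  curr = "g" ∨ curr ∈ arr
instance (n : Int) (curr : String) (arr : List String) : Decidable (Pre_getPassSec n curr arr) := by
  unfold Pre_getPassSec; infer_instance

def pvWitness_getPassSec : Int × String × List String := (0, "r", ["r", "y", "g", "r"])

def Spec_getPassSec (n : Int) (curr : String) (arr : List String) (out : Int) : Prop := out = getPassSec_alt n curr arr
instance (n : Int) (curr : String) (arr : List String) (out : Int) : Decidable (Spec_getPassSec n curr arr out) := by unfold Spec_getPassSec; infer_instance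

-- ===== CLAIM (what is proved, stated in full; the proofs are below) =====
def Claim_equal_getPassSec : Prop := ∀ (n : Int) (curr : String) (arr : List String), Dom_getPassSec n curr arr → Pre_getPassSec n curr arr → Spec_getPassSec n curr arr (getPassSec n curr arr)

-- ===== LEMMAS AND PROOFS =====

-- distance from the head of l to the first "g" (l.length if none)
def DlN (l : List String) : Nat :=
  match l with
  | [] => 0
  | x :: xs => if x = "g" then 0 else DlN xs + 1

theorem DlN_cons (x : String) (xs : List String) :
    DlN (x :: xs) = if x = "g" then 0 else DlN xs + 1 := rfl

-- distances recorded at every occurrence of curr (B's view, in position order)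
def occl (curr : String) (l : List String) : List Nat :=
  match l with
  | [] => []
  | x :: xs => if x = curr then DlN (x :: xs) :: occl curr xs else occl curr xs

-- distances A records: only at the first occurrence of each run, then skip past the "g"
def recl (curr : String) (l : List String) : List Nat :=
  match l with
  | [] => []
  | x :: xs =>
    if x = curr then DlN (x :: xs) :: recl curr ((x :: xs).drop (DlN (x :: xs) + 1))
    else recl curr xs
termination_by l.length
decreasing_by
  · simp only [List.length_drop, List.length_cons]; omega
  · simp

theorem recl_cons (curr x : String) (xs : List String) :
    recl curr (x :: xs)
      = if x = curr then DlN (x :: xs) :: recl curr ((x :: xs).drop (DlN (x :: xs) + 1))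
        else recl curr xs := by
  rw [recl.eq_def]

-- sequential writes of A into the preallocated paths array
def writeAll (p : List Int) (j : Nat) (ks : List Nat) : List Int :=
  match ks with
  | [] => p
  | k :: ks => writeAll (p.set j (Int.ofNat k)) (j + 1) ks

theorem innerA_eq_DlN (L : List String) (i : Nat) : innerA L i = DlN (L.drop i) := by
  fun_induction innerA L i with
  | case1 i h hg =>
    rw [List.drop_eq_getElem_cons h, DlN]
    simp [hg]
  | case2 i h hg ih =>
    rw [List.drop_eq_getElem_cons h, DlN]
    simp [hg, ih]
  | case3 i h =>
    rw [List.drop_eq_nil_of_le (by omega), DlN]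

theorem loopA_eq_writeAll (curr : String) (L : List String) (i j : Nat) (paths : List Int) :
    loopA curr L i j paths = writeAll paths j (recl curr (L.drop i)) := by
  fun_induction loopA curr L i j paths with
  | case1 i j paths h hc k ih =>
    have hk : k = DlN (L.drop i) := innerA_eq_DlN L i
    rw [List.drop_eq_getElem_cons h] at hk ⊢
    rw [recl_cons, if_pos hc, ← hk]
    show _ = writeAll (paths.set j (Int.ofNat k)) (j + 1) (recl curr ((L[i] :: L.drop (i + 1)).drop (k + 1)))
    rw [← List.drop_eq_getElem_cons h, List.drop_drop]
    rw [← Nat.add_assoc]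
    exact ih
  | case2 i j paths h hc ih =>
    rw [List.drop_eq_getElem_cons h, recl_cons, if_neg hc, ih]
  | case3 i j paths h =>
    rw [List.drop_eq_nil_of_le (by omega), recl, writeAll]

theorem writeAll_shift (ks : List Nat) (a : Int) (p : List Int) (j : Nat) :
    writeAll (a :: p) (j + 1) ks = a :: writeAll p j ks := by
  induction ks generalizing a p j with
  | nil => rfl
  | cons k ks ih =>
    show writeAll ((a :: p).set (j + 1) (Int.ofNat k)) (j + 2) ks
        = a :: writeAll (p.set j (Int.ofNat k)) (j + 1) ks
    rw [List.set_cons_succ, ih]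

theorem writeAll_zero (ks : List Nat) (p : List Int) (hcap : ks.length ≤ p.length) :
    writeAll p 0 ks = ks.map Int.ofNat ++ p.drop ks.length := by
  induction ks generalizing p with
  | nil => simp [writeAll]
  | cons k ks ih =>
    cases p with
    | nil => simp at hcap
    | cons a p =>
      show writeAll ((a :: p).set 0 (Int.ofNat k)) 1 ks = _
      rw [List.set_cons_zero]
      rw [show (1 : Nat) = 0 + 1 from rfl, writeAll_shift, ih p (by simpa using hcap)]
      simp

-- occl of a drop is contained in occl
theorem occl_drop_subset (curr : String) (m : Nat) :
    ∀ (t : List String), ∀ z ∈ occl curr (t.drop m), z ∈ occl curr t := by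
  induction m with
  | zero => simp
  | succ m ihm =>
    intro t z hz
    cases t with
    | nil => simpa using hz
    | cons a t =>
      simp only [List.drop_succ_cons] at hz
      have := ihm t z hz
      rw [occl]
      by_cases ha : a = curr <;> simp [ha, this]

-- every value A records is one of the occurrence distances
theorem recl_subset_occl (curr : String) :
    ∀ l : List String, ∀ x ∈ recl curr l, x ∈ occl curr l := by
  intro l
  fun_induction recl curr l with
  | case1 => simp
  | case2 xs ih =>
    intro y hy
    rw [occl]
    simp only [if_pos rfl]
    rcases List.mem_cons.1 hy with h | h
    · exact List.mem_cons.2 (Or.inl h)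
    · have h2 := ih y h
      have h3 := occl_drop_subset curr (DlN (curr :: xs) + 1) (curr :: xs) y h2
      rw [occl] at h3
      simp only [if_pos rfl] at h3
      exact h3
  | case3 x xs hc ih =>
    intro y hy
    rw [occl]
    simp [hc, ih y hy]

-- an occurrence distance is either within the first run-to-g or occurs past it
theorem occl_split (curr : String) (hg : curr ≠ "g") :
    ∀ l : List String, ∀ y ∈ occl curr l,
      y ≤ DlN l ∨ y ∈ occl curr (l.drop (DlN l + 1)) := by
  intro l
  induction l with
  | nil => simp [occl]
  | cons x xs ih =>
    intro y hy
    rw [occl] at hy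
    by_cases hxg : x = "g"
    · have hxc : x ≠ curr := fun h => hg (by rw [← h]; exact hxg)
      simp only [if_neg hxc] at hy
      rw [DlN_cons, if_pos hxg]
      right
      simpa using hy
    · rw [DlN_cons, if_neg hxg]
      simp only [List.drop_succ_cons]
      by_cases hx : x = curr
      · simp only [if_pos hx] at hy
        rcases List.mem_cons.1 hy with h | h
        · left; rw [h, DlN_cons, if_neg hxg]
        · rcases ih y h with h2 | h2
          · left; omega
          · right; exact h2
      · simp only [if_neg hx] at hy
        rcases ih y hy with h2 | h2
        · left; omega
        · right; exact h2

-- every occurrence distance is dominated by some value A records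
theorem occl_le_recl (curr : String) (hg : curr ≠ "g") :
    ∀ l : List String, ∀ y ∈ occl curr l, ∃ x ∈ recl curr l, y ≤ x := by
  intro l
  fun_induction recl curr l with
  | case1 => simp [occl]
  | case2 xs ih =>
    intro y hy
    rcases occl_split curr hg (curr :: xs) y hy with h | h
    · exact ⟨DlN (curr :: xs), List.mem_cons_self .., h⟩
    · rcases ih y h with ⟨z, hz, hyz⟩
      exact ⟨z, List.mem_cons_of_mem _ hz, hyz⟩
  | case3 x xs hc ih =>
    intro y hy
    rw [occl] at hy
    simp only [if_neg hc] at hy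
    exact ih y hy

theorem occl_ne_nil (curr : String) (l : List String) (h : curr ∈ l) :
    occl curr l ≠ [] := by
  induction l with
  | nil => simp at h
  | cons x xs ih =>
    rw [occl]
    by_cases hx : x = curr
    · simp [hx]
    · rcases List.mem_cons.1 h with h1 | h1
      · exact absurd h1.symm hx
      · simpa [hx] using ih h1

theorem recl_length_le_count (curr : String) :
    ∀ l : List String, (recl curr l).length ≤ l.countP (· = curr) := by
  intro l
  fun_induction recl curr l with
  | case1 => simp
  | case2 xs ih =>
    have hsub : (curr :: xs).drop (DlN (curr :: xs) + 1) = xs.drop (DlN (curr :: xs)) := by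
      simp
    have hc2 : ((curr :: xs).drop (DlN (curr :: xs) + 1)).countP (· = curr) ≤ xs.countP (· = curr) := by
      rw [hsub]; exact (List.drop_sublist _ _).countP_le
    simp only [List.length_cons, List.countP_cons]
    simp only [decide_eq_true_eq, if_pos rfl]
    simp only [decide_true, if_true]
    omega
  | case3 x xs hc ih =>
    rw [List.countP_cons]
    omega

theorem countCurrent_eq (curr : String) (arr : List String) :
    countCurrentOccurrence curr arr = (arr.countP (· = curr) : Int) := by
  have gen : ∀ (l : List String) (c : Int),
      l.foldl (fun occur i => if i = curr then occur + 1 else occur) c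
        = c + (l.countP (· = curr) : Int) := by
    intro l
    induction l with
    | nil => simp
    | cons x xs ih =>
      intro c
      rw [List.foldl_cons, List.countP_cons]
      by_cases hx : x = curr
      · rw [if_pos hx, ih]
        simp [hx]; push_cast; ring
      · rw [if_neg hx, ih]
        simp [hx]
  rw [countCurrentOccurrence, gen]
  simp

-- max? = some M when M is a member bounding the list
theorem max?_eq_of_mem_of_bound (l : List Int) (M : Int) (hM : M ∈ l)
    (hb : ∀ x ∈ l, x ≤ M) : PySem.List.max? l (fun x => x) = some M := by
  cases l with
  | nil => simp at hM
  | cons x t =>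
    rw [PySem.List.max?_id_cons]
    congr 1
    have h1 := PySem.List.le_foldl_max t x
    have hmem := PySem.List.foldl_max_mem t x
    have hle : t.foldl max x ≤ M := by
      rcases hmem with h | h
      · rw [h]; exact hb x (List.mem_cons_self ..)
      · exact hb _ (List.mem_cons_of_mem _ h)
    have hge : M ≤ t.foldl max x := by
      rcases List.mem_cons.1 hM with h | h
      · rw [h] at *; exact h1.1
      · exact h1.2 M h
    omega

-- B's fold computes (distance of the whole list, reversed occurrence distances)
theorem foldB_eq (curr : String) (l : List String) :
    l.reverse.foldl
        (fun (s : Int × List Int) x =>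
          let d : Int := if x = "g" then 0 else s.1 + 1
          (d, if x = curr then s.2 ++ [d] else s.2))
        (0, [])
      = (Int.ofNat (DlN l), ((occl curr l).map Int.ofNat).reverse) := by
  induction l with
  | nil => simp [DlN, occl]
  | cons x xs ih =>
    rw [List.reverse_cons, List.foldl_append, ih]
    simp only [List.foldl_cons, List.foldl_nil]
    have hcast : Int.ofNat (DlN xs + 1) = Int.ofNat (DlN xs) + 1 := by
      simp [Int.ofNat_eq_natCast]
    by_cases hx : x = curr
    · subst hx
      by_cases hxg : x = "g"
      · simp [DlN_cons, occl, hxg]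
      · simp [DlN_cons, occl, hxg, hcast]
    · by_cases hxg : x = "g"
      · have hx' : ¬ ("g" : String) = curr := by rw [← hxg]; exact hx
        simp [DlN_cons, occl, hxg, hx']
      · simp [DlN_cons, occl, hx, hxg, hcast]

-- ===== VERDICT (by name: the statement is the Claim_ definition above) =====
theorem getPassSec_spec : Claim_equal_getPassSec := by
  intro n curr arr _ hpre
  unfold Spec_getPassSec
  by_cases hg : curr = "g"
  · simp [getPassSec, getPassSec_alt, hg]
  · have hmem : curr ∈ arr := by
      rcases hpre with h | h
      · exact absurd h hg
      · exact h
    set L := arr ++ arr with hL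
    have hmemL : curr ∈ L := by rw [hL]; exact List.mem_append.2 (Or.inl hmem)
    have hnn : occl curr L ≠ [] := occl_ne_nil curr L hmemL
    set occI : List Int := (occl curr L).map Int.ofNat with hoccI
    have hoccnn : occI ≠ [] := by
      rw [hoccI]; simpa using hnn
    obtain ⟨M, hMsome⟩ : ∃ M, PySem.List.max? occI (fun x => x) = some M := by
      cases h : PySem.List.max? occI (fun x => x) with
      | none => exact absurd ((PySem.List.max?_eq_none_iff _ _).1 h) hoccnn
      | some m => exact ⟨m, rfl⟩
    have hMmem : M ∈ occI := PySem.List.max?_mem hMsome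
    have hMmax : ∀ x ∈ occI, x ≤ M := fun x hx => PySem.List.max?_isMax hMsome x hx
    have hM0 : 0 ≤ M := by
      rcases List.mem_map.1 hMmem with ⟨k, _, hk⟩
      simp only [Int.ofNat_eq_natCast] at hk
      omega
    -- M is attained inside recl
    have hMrec : Int.toNat M ∈ recl curr L := by
      rcases List.mem_map.1 hMmem with ⟨k, hkocc, hk⟩
      rcases occl_le_recl curr hg L k hkocc with ⟨z, hz, hkz⟩
      have hzocc := recl_subset_occl curr L z hz
      have hzle : (Int.ofNat z) ≤ M := hMmax _ (List.mem_map.2 ⟨z, hzocc, rfl⟩)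
      have hzeq : z = M.toNat := by
        simp only [Int.ofNat_eq_natCast] at hk hzle
        omega
      rwa [← hzeq]
    have hrecbound : ∀ k ∈ recl curr L, (Int.ofNat k) ≤ M := fun k hk =>
      hMmax _ (List.mem_map.2 ⟨k, recl_subset_occl curr L k hk, rfl⟩)
    -- A's side
    have hcap : (recl curr L).length ≤ (2 * countCurrentOccurrence curr arr).toNat := by
      have h1 := recl_length_le_count curr L
      have hLc : L.countP (· = curr) = 2 * arr.countP (· = curr) := by
        rw [hL, List.countP_append]; omega
      rw [countCurrent_eq]
      omega
    have hA : getPassSec n curr arr = M := by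
      rw [getPassSec, if_neg hg]
      simp only [← hL]
      rw [loopA_eq_writeAll, List.drop_zero,
        writeAll_zero _ _ (by simpa using hcap), List.drop_replicate]
      rw [max?_eq_of_mem_of_bound _ M
        (List.mem_append.2 (Or.inl (List.mem_map.2 ⟨M.toNat, hMrec, by simp only [Int.ofNat_eq_natCast]; omega⟩)))
        (by
          intro x hx
          rcases List.mem_append.1 hx with h | h
          · rcases List.mem_map.1 h with ⟨k, hk, hkx⟩
            rw [← hkx]; exact hrecbound k hk
          · rw [List.eq_of_mem_replicate h]; exact hM0)]
      rfl
    have hB : getPassSec_alt n curr arr = M := by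
      rw [getPassSec_alt, if_neg hg]
      simp only [← hL]
      rw [foldB_eq]
      rw [max?_eq_of_mem_of_bound _ M
        (by rw [List.mem_reverse, ← hoccI]; exact hMmem)
        (by intro x hx; rw [List.mem_reverse, ← hoccI] at hx; exact hMmax x hx)]
      rfl
    rw [hA, hB]
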